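-- pv_equiv track=rewrite | github.com/artur-auditore/CRC-e-Hamming | CRC.py | calcula_grau
-- ===== SOURCE A (Python) =====
-- def calcula_grau(gx):
--     ct = 0
--     grau = 0
--     for i in range(len(gx)):
--         if gx[i] == '0' and ct == 0:
--             pass
--         else:
--             ct += 1
--             grau += 1
--     return grau - 1
-- ===== SOURCE B (Python) =====
-- def calcula_grau(gx):
--     if gx == "":
--         return -1
--     if gx[0] == '0':
--         return calcula_grau(gx[1:])
--     return len(gx) - 1
-- ===== Notes on version B (the rewrite author's own statement) =====
-- stated objective: simpler
-- what changed: Replaces the single-pass loop with two accumulating counters by a direct structural recursion that peels leading zeros and returns len(gx)-1 at the first non-zero character; it stops there instead of scanning the rest of the string.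
import Mathlib
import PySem

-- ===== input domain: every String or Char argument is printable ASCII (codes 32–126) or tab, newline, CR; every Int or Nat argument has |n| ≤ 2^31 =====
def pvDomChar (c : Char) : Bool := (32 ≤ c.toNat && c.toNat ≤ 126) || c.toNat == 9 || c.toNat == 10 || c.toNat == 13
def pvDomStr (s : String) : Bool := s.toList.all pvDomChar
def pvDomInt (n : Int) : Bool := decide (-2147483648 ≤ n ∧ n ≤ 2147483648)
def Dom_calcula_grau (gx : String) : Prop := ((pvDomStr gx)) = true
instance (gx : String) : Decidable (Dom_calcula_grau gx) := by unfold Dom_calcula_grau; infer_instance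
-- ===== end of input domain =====

-- B replaces A's counter loop by a structural recursion peeling leading zeros (objective: simpler).

-- ===== PORT A =====
-- for i in range(len gx): visits gx[0..len-1] in order = a fold over gx.toList with state (ct, grau)
def calcula_grau (gx : String) : Int :=
  let st := gx.toList.foldl
    (fun (p : Int × Int) c => if c == '0' && p.1 == 0 then p else (p.1 + 1, p.2 + 1))
    (0, 0)
  st.2 - 1

-- ===== PORT B =====
-- Source B recurses on gx[0] / gx[1:]; ported as structural recursion on the code points
-- (exact: gx == "" ↔ empty list, gx[0] = head, gx[1:] = tail for a nonempty string).
def calcula_grau_altRec : List Char → Int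
  | [] => -1
  | c :: t => if c = '0' then calcula_grau_altRec t else (t.length : Int) + 1 - 1

def calcula_grau_alt (gx : String) : Int := calcula_grau_altRec gx.toList

-- ===== PRECONDITION & SPEC =====
def Spec_calcula_grau (gx : String) (out : Int) : Prop := out = calcula_grau_alt gx
instance (gx : String) (out : Int) : Decidable (Spec_calcula_grau gx out) := by unfold Spec_calcula_grau; infer_instance

-- ===== CLAIM =====
def Claim_equal_calcula_grau : Prop := ∀ (gx : String), Dom_calcula_grau gx → Spec_calcula_grau gx (calcula_grau gx)

-- ===== LEMMAS AND PROOFS =====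

-- once ct > 0 the skip branch never fires again: each step adds 1 to both components
theorem pv_foldl_pos (l : List Char) (n m : Int) (hn : 0 < n) :
    (l.foldl (fun (p : Int × Int) c => if c == '0' && p.1 == 0 then p else (p.1 + 1, p.2 + 1)) (n, m))
      = (n + l.length, m + l.length) := by
  induction l generalizing n m with
  | nil => simp
  | cons c t ih =>
    simp only [List.foldl_cons, List.length_cons]
    rw [if_neg (by simp [hn.ne']), ih (n + 1) (m + 1) (by omega)]
    push_cast
    simp only [Prod.mk.injEq]
    omega

-- A's fold from the initial state computes B's recursion plus one
theorem pv_foldl_zero (l : List Char) :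
    (l.foldl (fun (p : Int × Int) c => if c == '0' && p.1 == 0 then p else (p.1 + 1, p.2 + 1)) (0, 0)).2
      = calcula_grau_altRec l + 1 := by
  induction l with
  | nil => simp [calcula_grau_altRec]
  | cons c t ih =>
    by_cases h : c = '0'
    · subst h
      simpa [calcula_grau_altRec] using ih
    · simp only [List.foldl_cons, calcula_grau_altRec]
      rw [if_neg (by simp [h]),
        show ((0 : Int) + 1, (0 : Int) + 1) = (1, 1) by norm_num,
        pv_foldl_pos t 1 1 (by omega), if_neg h]
      simp
      omega

-- ===== VERDICT =====
theorem calcula_grau_spec : Claim_equal_calcula_grau := by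
  intro gx _
  unfold Spec_calcula_grau calcula_grau calcula_grau_alt
  simp only [pv_foldl_zero]
  omega
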